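-- pv_equiv track=rewrite | github.com/easycodinggithub/Programmers_Python | 할인 행사.py | solution
-- ===== SOURCE A (Python) =====
-- def solution(want, number, discount):
--     temp = []
--     answer = 0
--
--     for i in range(0, len(discount)-9, 1):
--         temp.append(discount[i:i+10])
--
--     for a in temp:
--         tempn = [0 for i in range(len(number))]
--         for i in a:
--             if i in want:
--                 tempn[want.index(i)] += 1
--         check = 0
--         for i in range(0, len(number), 1):
--             if number[i] != tempn[i]:
--                 check = 1
--         if check == 0:
--             answer += 1
--     return answer
-- ===== SOURCE B (Python) =====
-- def solution(want, number, discount):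
--     # Sliding 10-day window: keep a tally of how many of each wanted item the
--     # current window holds and a counter of how many quantities currently
--     # match, updating both in O(1) per day instead of recounting every window.
--     index = {}
--     for j, w in enumerate(want):
--         index.setdefault(w, j)
--     tally = [0] * len(number)
--     matched = sum(1 for n in number if n == 0)
--     answer = 0
--     for i, d in enumerate(discount):
--         j = index.get(d)
--         if j is not None:
--             if tally[j] == number[j]:
--                 matched -= 1
--             tally[j] += 1
--             if tally[j] == number[j]:
--                 matched += 1
--         if i >= 10:
--             j = index.get(discount[i - 10])
--             if j is not None:
--                 if tally[j] == number[j]: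
--                     matched -= 1
--                 tally[j] -= 1
--                 if tally[j] == number[j]:
--                     matched += 1
--         if i >= 9 and matched == len(number):
--             answer += 1
--     return answer
-- ===== Notes on version B (the rewrite author's own statement) =====
-- stated objective: faster
-- what changed: A re-slices every 10-day window and recounts it from scratch with a per-element 'in want'/'want.index' scan plus a fresh tally list; B builds an item->position dict once and slides a single 10-day window over discount, incrementally updating a tally list and a matched-quantities counter, so each day costs O(1); …
-- outside the precondition, e.g. on solution(['a', 'b'], [1], ['b', 'c', 'c', 'c']): A returns 0, B raises IndexError
import Mathlib
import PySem

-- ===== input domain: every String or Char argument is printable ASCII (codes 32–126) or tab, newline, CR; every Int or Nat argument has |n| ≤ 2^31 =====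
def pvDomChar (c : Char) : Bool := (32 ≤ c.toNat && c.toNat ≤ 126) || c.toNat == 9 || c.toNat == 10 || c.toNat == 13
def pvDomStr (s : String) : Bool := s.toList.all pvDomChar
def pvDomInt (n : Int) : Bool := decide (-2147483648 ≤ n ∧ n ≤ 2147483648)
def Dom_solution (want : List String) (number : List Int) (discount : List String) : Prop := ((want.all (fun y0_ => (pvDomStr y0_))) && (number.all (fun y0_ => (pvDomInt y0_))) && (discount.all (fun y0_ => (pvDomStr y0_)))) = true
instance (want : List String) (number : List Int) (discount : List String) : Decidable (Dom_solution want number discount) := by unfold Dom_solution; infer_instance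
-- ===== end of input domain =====

-- B replaces A's per-window recount (a fresh tally list and a want.index scan per element
-- of each of the n-9 windows) by one sliding 10-day window with an incrementally updated
-- tally list and a matched-quantities counter; return values agree on Pre_solution.

-- ===== PORT A =====
def solution (want : List String) (number : List Int) (discount : List String) : Int :=
  -- temp = []; for i in range(0, len(discount)-9, 1): temp.append(discount[i:i+10])
  let temp : List (List String) :=
    (PySem.List.pyRange 0 ((discount.length : Int) - 9) 1).foldl
      (fun temp i => temp ++ [PySem.List.slice discount (some i) (some (i + 10))]) []
  -- for a in temp: …
  temp.foldl (fun answer a =>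
    -- tempn = [0 for i in range(len(number))]
    let tempn : List Int := (PySem.List.pyRange 0 (number.length : Int) 1).map (fun _ => 0)
    -- for i in a: if i in want: tempn[want.index(i)] += 1
    -- exact via pyGetD/pySetD when want.index(i) < len(tempn); Pre_solution ensures this
    let tempn : List Int := a.foldl (fun tempn i =>
      if i ∈ want then
        let j : Int := (((PySem.List.index? want i).getD 0 : Nat) : Int)
        PySem.List.pySetD tempn j (PySem.List.pyGetD tempn j 0 + 1)
      else tempn) tempn
    -- check = 0; for i in range(0, len(number), 1): if number[i] != tempn[i]: check = 1
    let check : Int := (PySem.List.pyRange 0 (number.length : Int) 1).foldl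
      (fun check i =>
        if PySem.List.pyGetD number i 0 ≠ PySem.List.pyGetD tempn i 0 then 1 else check) 0
    if check = 0 then answer + 1 else answer) 0

-- ===== PORT B =====
def solution_alt (want : List String) (number : List Int) (discount : List String) : Int :=
  -- index = {}; for j, w in enumerate(want): index.setdefault(w, j)
  let index : PySem.Dict String Int :=
    (PySem.List.enumerate want 0).foldl (fun d p => d.setdefault p.2 p.1) PySem.Dict.empty
  -- tally = [0] * len(number)
  let tally0 : List Int := (PySem.List.pyRange 0 (number.length : Int) 1).map (fun _ => 0)
  -- matched = sum(1 for n in number if n == 0)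
  let matched0 : Int := number.foldl (fun m n => if n = 0 then m + 1 else m) 0
  -- for i, d in enumerate(discount): …   (tally[j] accesses are exact via pyGetD/pySetD
  -- because Pre_solution keeps every looked-up index j inside tally and number)
  let st := (PySem.List.enumerate discount 0).foldl
    (fun (st : List Int × Int × Int) (p : Int × String) =>
    -- j = index.get(d); if j is not None: (update entering item)
    let s1 : List Int × Int :=
      match index.get? p.2 with
      | some j =>
        (PySem.List.pySetD st.1 j (PySem.List.pyGetD st.1 j 0 + 1),
         if PySem.List.pyGetD (PySem.List.pySetD st.1 j (PySem.List.pyGetD st.1 j 0 + 1)) j 0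
            = PySem.List.pyGetD number j 0
         then (if PySem.List.pyGetD st.1 j 0 = PySem.List.pyGetD number j 0
               then st.2.1 - 1 else st.2.1) + 1
         else (if PySem.List.pyGetD st.1 j 0 = PySem.List.pyGetD number j 0
               then st.2.1 - 1 else st.2.1))
      | none => (st.1, st.2.1)
    -- if i >= 10: j = index.get(discount[i-10]); if j is not None: (update leaving item)
    let s2 : List Int × Int :=
      if 10 ≤ p.1 then
        match index.get? (PySem.List.pyGetD discount (p.1 - 10) "") with
        | some j =>
          (PySem.List.pySetD s1.1 j (PySem.List.pyGetD s1.1 j 0 - 1),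
           if PySem.List.pyGetD (PySem.List.pySetD s1.1 j (PySem.List.pyGetD s1.1 j 0 - 1)) j 0
              = PySem.List.pyGetD number j 0
           then (if PySem.List.pyGetD s1.1 j 0 = PySem.List.pyGetD number j 0
                 then s1.2 - 1 else s1.2) + 1
           else (if PySem.List.pyGetD s1.1 j 0 = PySem.List.pyGetD number j 0
                 then s1.2 - 1 else s1.2))
        | none => s1
      else s1
    -- if i >= 9 and matched == len(number): answer += 1
    (s2.1, s2.2, if 9 ≤ p.1 ∧ s2.2 = (number.length : Int) then st.2.2 + 1 else st.2.2))
    (tally0, matched0, (0 : Int))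
  st.2.2

-- ===== PRECONDITION & SPEC =====
-- Pre_ excludes exactly the inputs on which a discount item's want position lies outside
-- number: there A raises IndexError as soon as a 10-day window reaches that item, and B's
-- tally update raises at that item too (immediately, so on discounts shorter than 10 days
-- A still returns 0 while B raises).
def Pre_solution (want : List String) (number : List Int) (discount : List String) : Prop :=
  ∀ s ∈ discount, s ∈ want → want.idxOf s < number.length
instance (want : List String) (number : List Int) (discount : List String) : Decidable (Pre_solution want number discount) := by unfold Pre_solution; infer_instance

def pvWitness_solution : List String × List Int × List String :=
  (["a", "b"], [1, 0], ["a", "x", "x", "x", "x", "x", "x", "x", "x", "x", "b", "a"])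

def Spec_solution (want : List String) (number : List Int) (discount : List String) (out : Int) : Prop := out = solution_alt want number discount
instance (want : List String) (number : List Int) (discount : List String) (out : Int) : Decidable (Spec_solution want number discount out) := by unfold Spec_solution; infer_instance

-- ===== CLAIM (what is proved, stated in full; the proofs are below) =====
def Claim_equal_solution : Prop := ∀ (want : List String) (number : List Int) (discount : List String), Dom_solution want number discount → Pre_solution want number discount → Spec_solution want number discount (solution want number discount)

-- ===== LEMMAS AND PROOFS =====

def pvAttr (want : List String) (a : List String) (j : Nat) : Int :=
  ((a.filter (fun s => decide (s ∈ want) && (want.idxOf s == j))).length : Int)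

theorem pvAttr_nil (want : List String) (j : Nat) : pvAttr want [] j = 0 := rfl

theorem pvAttr_cons (want : List String) (s : String) (rest : List String) (j : Nat) :
    pvAttr want (s :: rest) j =
      (if s ∈ want ∧ want.idxOf s = j then 1 else 0) + pvAttr want rest j := by
  simp only [pvAttr, List.filter_cons]
  by_cases h : s ∈ want ∧ want.idxOf s = j
  · rw [if_pos h]; simp [h.1, h.2]; ring
  · rw [if_neg h]
    have : ¬(decide (s ∈ want) && (want.idxOf s == j)) = true := by
      simp only [Bool.and_eq_true, decide_eq_true_eq, beq_iff_eq]; exact h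
    simp [this]

-- the common reference value both ports are reduced to: the number of 10-day windows in
-- which, for every position j of number, exactly number[j] window items have j as their
-- first index in want
def pvRef (want : List String) (number : List Int) (discount : List String) : Int :=
  ((List.range (discount.length - 9)).countP
    (fun i => decide (∀ j < number.length,
      pvAttr want ((discount.drop i).take 10) j = number.getD j 0)) : Int)

-- ---- A-side lemmas: each window recount equals the reference predicate ----
theorem pv_getD_set (xs : List Int) (j : Nat) (v : Int) (h : j < xs.length) (j' : Nat) :
    (xs.set j v).getD j' 0 = if j' = j then v else xs.getD j' 0 := by
  rw [List.getD_eq_getElem?_getD, List.getD_eq_getElem?_getD, List.getElem?_set]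
  by_cases h1 : j' = j
  · subst h1; simp [h]
  · rw [if_neg (by omega), if_neg h1]

theorem pv_idxOf?_of_mem (l : List String) (s : String) (h : s ∈ l) :
    l.idxOf? s = some (l.idxOf s) := by
  induction l with
  | nil => simp at h
  | cons x t ih =>
    rw [List.mem_cons] at h
    by_cases hx : x = s
    · subst hx; simp [List.idxOf?_cons, List.idxOf_cons_self]
    · simp only [List.idxOf?_cons, List.idxOf_cons_ne t hx, beq_iff_eq]
      rw [if_neg hx, ih (h.resolve_left (fun e => hx e.symm))]
      rfl

theorem pv_tempn_fold (want : List String) (m : Nat) (a : List String)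
    (h : ∀ s ∈ a, s ∈ want → want.idxOf s < m) (tempn : List Int) (hlen : tempn.length = m) :
    (a.foldl (fun tempn i =>
      if i ∈ want then
        let j : Int := (((PySem.List.index? want i).getD 0 : Nat) : Int)
        PySem.List.pySetD tempn j (PySem.List.pyGetD tempn j 0 + 1)
      else tempn) tempn).length = m ∧
    ∀ j < m, (a.foldl (fun tempn i =>
      if i ∈ want then
        let j : Int := (((PySem.List.index? want i).getD 0 : Nat) : Int)
        PySem.List.pySetD tempn j (PySem.List.pyGetD tempn j 0 + 1)
      else tempn) tempn).getD j 0 = tempn.getD j 0 + pvAttr want a j := by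
  induction a generalizing tempn with
  | nil => refine ⟨hlen, ?_⟩; intro j _; simp [pvAttr_nil]
  | cons s rest ih =>
    rw [List.foldl_cons]
    by_cases hs : s ∈ want
    · have hidx : PySem.List.index? want s = some (want.idxOf s) := by
        rw [PySem.List.index?_eq_idxOf?]; exact pv_idxOf?_of_mem want s hs
      have hstep : (if s ∈ want then
            let j : Int := (((PySem.List.index? want s).getD 0 : Nat) : Int)
            PySem.List.pySetD tempn j (PySem.List.pyGetD tempn j 0 + 1)
          else tempn)
          = tempn.set (want.idxOf s) (tempn.getD (want.idxOf s) 0 + 1) := by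
        simp only [if_pos hs, hidx, Option.getD_some, PySem.List.pySetD_natCast,
          PySem.List.pyGetD_natCast]
      rw [hstep]
      have hlt : want.idxOf s < m := h s (by simp) hs
      have hlen' : (tempn.set (want.idxOf s) (tempn.getD (want.idxOf s) 0 + 1)).length = m := by
        simpa using hlen
      obtain ⟨L1, L2⟩ := ih (fun x hx hw => h x (by simp [hx]) hw) _ hlen'
      refine ⟨L1, ?_⟩
      intro j hj
      rw [L2 j hj, pv_getD_set _ _ _ (by omega) j, pvAttr_cons]
      split_ifs with h1 h2 h2
      · subst h1; ring
      · exact absurd ⟨hs, h1.symm⟩ h2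
      · exact absurd h2.2.symm h1
      · ring
    · have hstep : (if s ∈ want then
            let j : Int := (((PySem.List.index? want s).getD 0 : Nat) : Int)
            PySem.List.pySetD tempn j (PySem.List.pyGetD tempn j 0 + 1)
          else tempn) = tempn := by
        simp only [if_neg hs]
      rw [hstep]
      obtain ⟨L1, L2⟩ := ih (fun x hx hw => h x (by simp [hx]) hw) tempn hlen
      refine ⟨L1, ?_⟩
      intro j hj
      rw [L2 j hj, pvAttr_cons]
      rw [if_neg (fun hc => hs hc.1)]
      ring

theorem pv_check_fold (number tempn : List Int) (m : Nat) :
    (PySem.List.pyRange 0 (m : Int) 1).foldl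
      (fun check i =>
        if PySem.List.pyGetD number i 0 ≠ PySem.List.pyGetD tempn i 0 then 1 else check) (0 : Int) =
    if ∀ j < m, number.getD j 0 = tempn.getD j 0 then 0 else 1 := by
  induction m with
  | zero =>
    rw [PySem.List.pyRange_one_eq_nil (by norm_num)]
    simp
  | succ m ih =>
    have hcast : ((m + 1 : Nat) : Int) = (m : Int) + 1 := by push_cast; ring
    rw [hcast, PySem.List.pyRange_one_succ_right (by positivity), List.foldl_append, ih]
    simp only [List.foldl_cons, List.foldl_nil, PySem.List.pyGetD_natCast]
    by_cases hm : number.getD m 0 = tempn.getD m 0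
    · rw [if_neg (by simpa using hm)]
      by_cases hall : ∀ j < m, number.getD j 0 = tempn.getD j 0
      · rw [if_pos hall, if_pos ?_]
        intro j hj
        rcases Nat.lt_succ_iff_lt_or_eq.mp hj with h | h
        · exact hall j h
        · subst h; exact hm
      · rw [if_neg hall, if_neg (fun hc => hall (fun j hj => hc j (Nat.lt_succ_of_lt hj)))]
    · rw [if_pos (by simpa using hm), if_neg (fun hc => hm (hc m (Nat.lt_succ_self m)))]

theorem pvAttr_append (want : List String) (a : List String) (x : String) (j : Nat) :
    pvAttr want (a ++ [x]) j =
      pvAttr want a j + (if x ∈ want ∧ want.idxOf x = j then 1 else 0) := by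
  simp only [pvAttr, List.filter_append, List.length_append]
  by_cases h : x ∈ want ∧ want.idxOf x = j
  · rw [if_pos h]
    simp [h.1, h.2]
  · rw [if_neg h]
    have : ¬(decide (x ∈ want) && (want.idxOf x == j)) = true := by
      simp only [Bool.and_eq_true, decide_eq_true_eq, beq_iff_eq]; exact h
    simp [this]

theorem pv_body_eq (want : List String) (number : List Int) (a : List String)
    (hidx : ∀ s ∈ a, s ∈ want → want.idxOf s < number.length) (answer : Int) :
    (let tempn : List Int := (PySem.List.pyRange 0 (number.length : Int) 1).map (fun _ => 0)
     let tempn : List Int := a.foldl (fun tempn i =>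
       if i ∈ want then
         let j : Int := (((PySem.List.index? want i).getD 0 : Nat) : Int)
         PySem.List.pySetD tempn j (PySem.List.pyGetD tempn j 0 + 1)
       else tempn) tempn
     let check : Int := (PySem.List.pyRange 0 (number.length : Int) 1).foldl
       (fun check i =>
         if PySem.List.pyGetD number i 0 ≠ PySem.List.pyGetD tempn i 0 then 1 else check) 0
     if check = 0 then answer + 1 else answer) =
    if (∀ j < number.length, pvAttr want a j = number.getD j 0)
    then answer + 1 else answer := by
  have hlen0 : ((PySem.List.pyRange 0 (number.length : Int) 1).map
      (fun _ => (0 : Int))).length = number.length := by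
    rw [List.length_map, PySem.List.length_pyRange_one]
    omega
  have hgd0 : ∀ j < number.length, ((PySem.List.pyRange 0 (number.length : Int) 1).map
      (fun _ => (0 : Int))).getD j 0 = 0 := by
    intro j hj
    rw [List.getD_eq_getElem _ _ (by omega), List.getElem_map]
  obtain ⟨L1, L2⟩ := pv_tempn_fold want number.length a hidx _ hlen0
  simp only
  rw [pv_check_fold]
  have heq : (∀ j < number.length,
      number.getD j 0 = (a.foldl (fun tempn i =>
        if i ∈ want then
          let j : Int := (((PySem.List.index? want i).getD 0 : Nat) : Int)
          PySem.List.pySetD tempn j (PySem.List.pyGetD tempn j 0 + 1)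
        else tempn) ((PySem.List.pyRange 0 (number.length : Int) 1).map (fun _ => 0))).getD j 0)
      ↔ (∀ j < number.length, pvAttr want a j = number.getD j 0) := by
    constructor
    · intro hc j hj; rw [hc j hj, L2 j hj, hgd0 j hj, zero_add]
    · intro hc j hj; rw [L2 j hj, hgd0 j hj, zero_add]; exact (hc j hj).symm
  by_cases hok : ∀ j < number.length, pvAttr want a j = number.getD j 0
  · rw [if_pos (heq.mpr hok), if_pos rfl, if_pos hok]
  · rw [if_neg (fun hc => hok (heq.mp hc)), if_neg (by norm_num), if_neg hok]

theorem pvA_eq_ref (want : List String) (number : List Int) (discount : List String)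
    (hdis : ∀ s ∈ discount, s ∈ want → want.idxOf s < number.length) :
    solution want number discount = pvRef want number discount := by
  unfold solution
  rw [PySem.List.foldl_append_singleton_eq_map, List.nil_append, PySem.List.pyRange_one,
    List.map_map, List.foldl_map]
  by_cases h9 : discount.length < 10
  · have h0 : (((discount.length : Int) - 9 - 0).toNat) = 0 := by omega
    rw [h0]
    unfold pvRef
    have h1 : discount.length - 9 = 0 := by omega
    rw [h1]
    simp
  · have hN : (((discount.length : Int) - 9 - 0).toNat) = discount.length - 9 := by omega
    rw [hN]
    have hwin : ∀ k : Nat,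
        PySem.List.slice discount (some ((0 : Int) + (k : Nat)))
          (some ((0 : Int) + (k : Nat) + 10)) = (discount.drop k).take 10 := by
      intro k
      have h0 : ((0 : Int) + (k : Nat)) = ((k : Nat) : Int) := by ring
      rw [h0]
      have h10 : (((k : Nat) : Int) + 10) = (((k + 10 : Nat) : Nat) : Int) := by
        push_cast; ring
      rw [h10, PySem.List.slice_natCast]
      congr 1
      omega
    rw [PySem.List.foldl_congr_mem _ _
        (fun (answer : Int) (k : Nat) =>
          if (∀ j < number.length, pvAttr want ((discount.drop k).take 10) j = number.getD j 0)
          then answer + 1 else answer) 0 ?_]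
    · rw [PySem.List.foldl_congr_mem _ _
          (fun (answer : Int) (k : Nat) =>
            if (fun k => decide (∀ j < number.length,
                pvAttr want ((discount.drop k).take 10) j = number.getD j 0)) k = true
            then answer + 1 else answer) 0 ?_]
      · rw [PySem.List.foldl_count_if, zero_add]
        rfl
      · intro answer k _
        simp only [decide_eq_true_eq]
    · intro answer k _
      simp only [Function.comp_apply]
      rw [hwin k]
      exact pv_body_eq want number ((discount.drop k).take 10)
        (fun s hs hw => hdis s (List.mem_of_mem_drop (List.mem_of_mem_take hs)) hw) answer

-- ---- B-side lemmas: the sliding window maintains the tally and the matched counter ----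

-- the item -> first-position dict B builds (under Nodup, positions are plain positions)
def pvIdxD (want : List String) : PySem.Dict String Int :=
  (PySem.List.enumerate want 0).foldl (fun d p => d.setdefault p.2 p.1) PySem.Dict.empty

theorem pv_keys_eq_items_map (d : PySem.Dict String Int) : d.keys = d.items.map Prod.fst := by
  simp [PySem.Dict.keys]

theorem pv_idx_items (want : List String) :
    (pvIdxD want).items =
      (PySem.Set.ofList want).map (fun w => (w, ((want.idxOf w : Nat) : Int))) := by
  induction want using List.reverseRecOn with
  | nil => simp [pvIdxD, PySem.Dict.empty, PySem.Set.ofList]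
  | append_singleton xs x ih =>
    unfold pvIdxD at ih ⊢
    rw [PySem.List.enumerate_append, List.foldl_append,
      PySem.List.enumerate_cons, PySem.List.enumerate_nil, List.foldl_cons, List.foldl_nil]
    set D := (PySem.List.enumerate xs 0).foldl
      (fun d p => d.setdefault p.2 p.1) PySem.Dict.empty with hD
    have hkeys : D.keys = PySem.Set.ofList xs := by
      rw [pv_keys_eq_items_map, ih, List.map_map]
      have he : (Prod.fst ∘ fun w => (w, ((xs.idxOf w : Nat) : Int))) = id := rfl
      rw [he, List.map_id]
    have hmapcongr : ∀ w ∈ PySem.Set.ofList xs,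
        (w, (((xs ++ [x]).idxOf w : Nat) : Int)) = (w, ((xs.idxOf w : Nat) : Int)) := by
      intro w hw
      have hw' : w ∈ xs := (PySem.Set.mem_ofList xs w).mp hw
      rw [List.idxOf_append_of_mem hw']
    by_cases hx : x ∈ xs
    · have hc : D.contains x = true := by
        rw [PySem.Dict.contains_iff_mem_keys, hkeys]
        exact (PySem.Set.mem_ofList xs x).mpr hx
      rw [PySem.Dict.setdefault_of_contains _ _ hc, ih, PySem.Set.ofList_append_singleton,
        PySem.Set.add_of_mem ((PySem.Set.mem_ofList xs x).mpr hx)]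
      exact (List.map_congr_left hmapcongr).symm
    · have hc : D.contains x = false := by
        rw [← Bool.not_eq_true, PySem.Dict.contains_iff_mem_keys, hkeys]
        exact fun hmem => hx ((PySem.Set.mem_ofList xs x).mp hmem)
      rw [PySem.Dict.setdefault_of_not_contains _ _ hc,
        PySem.Dict.items_insert_of_not_contains _ _ hc, ih,
        PySem.Set.ofList_append_singleton,
        PySem.Set.add_of_not_mem (fun hmem => hx ((PySem.Set.mem_ofList xs x).mp hmem)),
        List.map_append]
      congr 1
      · exact (List.map_congr_left hmapcongr).symm
      · simp only [List.map_cons, List.map_nil]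
        rw [List.idxOf_append_of_notMem hx, List.idxOf_cons_self]
        norm_num

theorem pv_idx_keys (want : List String) : (pvIdxD want).keys = PySem.Set.ofList want := by
  rw [pv_keys_eq_items_map, pv_idx_items, List.map_map]
  have he : (Prod.fst ∘ fun w => (w, ((want.idxOf w : Nat) : Int))) = id := rfl
  rw [he, List.map_id]

theorem pv_idx_get_mem (want : List String) (s : String) (hs : s ∈ want) :
    (pvIdxD want).get? s = some ((want.idxOf s : Nat) : Int) := by
  apply PySem.Dict.get?_of_mem_items
  · rw [pv_idx_items]
    exact List.mem_map.mpr ⟨s, (PySem.Set.mem_ofList want s).mpr hs, rfl⟩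
  · rw [pv_idx_keys]
    exact PySem.Set.nodup_ofList want

theorem pv_idx_get_notmem (want : List String) (s : String) (hs : s ∉ want) :
    (pvIdxD want).get? s = none := by
  rw [PySem.Dict.get?_eq_none_iff_not_mem_keys, pv_idx_keys]
  exact fun hmem => hs ((PySem.Set.mem_ofList want s).mp hmem)

def pvSeg (discount : List String) (k : Nat) : List String := (discount.take k).drop (k - 10)

theorem pv_seg_succ_small (discount : List String) (k : Nat) (hk : k < discount.length)
    (h10 : k < 10) :
    pvSeg discount k ++ [discount[k]] = pvSeg discount (k + 1) := by
  unfold pvSeg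
  rw [Nat.sub_eq_zero_of_le (by omega), Nat.sub_eq_zero_of_le (by omega),
    List.drop_zero, List.drop_zero, List.take_add_one, List.getElem?_eq_getElem hk]
  rfl

theorem pv_seg_succ_large (discount : List String) (k : Nat) (hk : k < discount.length)
    (h10 : 10 ≤ k) :
    pvSeg discount k ++ [discount[k]] = discount[k - 10]'(by omega) :: pvSeg discount (k + 1) := by
  unfold pvSeg
  have h1 : (discount.take k).drop (k - 10) ++ [discount[k]] =
      (discount.take k ++ [discount[k]]).drop (k - 10) := by
    rw [List.drop_append_of_le_length (by rw [List.length_take]; omega)]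
  rw [h1, ← List.take_succ_eq_append_getElem hk]
  have h2 : k + 1 - 10 = (k - 10) + 1 := by omega
  rw [h2, List.drop_eq_getElem_cons (by rw [List.length_take]; omega)]
  congr 1
  exact List.getElem_take

theorem pv_seg_window (discount : List String) (k : Nat) (h9 : 9 ≤ k) :
    pvSeg discount (k + 1) = (discount.drop (k - 9)).take 10 := by
  unfold pvSeg
  rw [List.drop_take]
  congr 1
  omega

-- counting over range m: update at a single position
theorem pv_countP_range_update (m j0 : Nat) (h : j0 < m) (p q : Nat → Bool)
    (hagree : ∀ i, i ≠ j0 → p i = q i) :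
    (((List.range m).countP q : Nat) : Int) =
      (((List.range m).countP p : Nat) : Int)
      - (if p j0 = true then 1 else 0) + (if q j0 = true then 1 else 0) := by
  obtain ⟨r, hr⟩ : ∃ r, m = (j0 + 1) + r := ⟨m - (j0 + 1), by omega⟩
  subst hr
  rw [List.range_add, List.countP_append, List.countP_append, List.range_succ,
    List.countP_append, List.countP_append]
  have h1 : (List.range j0).countP q = (List.range j0).countP p := by
    apply List.countP_congr
    intro i hi
    rw [List.mem_range] at hi
    rw [hagree i (by omega)]
  have h2 : ((List.range r).map (fun t => j0 + 1 + t)).countP q =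
      ((List.range r).map (fun t => j0 + 1 + t)).countP p := by
    rw [List.countP_map, List.countP_map]
    apply List.countP_congr
    intro t _
    simp only [Function.comp_apply]
    rw [hagree (j0 + 1 + t) (by omega)]
  have h3 : ∀ b : Nat → Bool, [j0].countP b = if b j0 = true then 1 else 0 := by
    intro b
    rw [List.countP_cons, List.countP_nil]
    by_cases hb : b j0 = true <;> simp [hb]
  rw [h1, h2, h3, h3]
  push_cast
  split_ifs <;> ring

theorem pv_countP_range_congr (m : Nat) (p q : Nat → Bool) (h : ∀ j < m, p j = q j) :
    (List.range m).countP p = (List.range m).countP q := by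
  apply List.countP_congr
  intro j hj
  rw [List.mem_range] at hj
  rw [h j hj]

-- one in-place update of the tally list together with the matched counter
theorem pv_upd (number : List Int) (T : List Int) (f : Nat → Int)
    (hTlen : T.length = number.length)
    (hT : ∀ j < number.length, T.getD j 0 = f j)
    (j0 : Nat) (hj0 : j0 < number.length) (v : Int) (M : Int)
    (hM : M = (((List.range number.length).countP (fun j => f j == number.getD j 0) : Nat) : Int)) :
    (T.set j0 v).length = number.length ∧
    (∀ j < number.length, (T.set j0 v).getD j 0 = if j = j0 then v else f j) ∧
    ((if (T.set j0 v).getD j0 0 = number.getD j0 0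
      then (if T.getD j0 0 = number.getD j0 0 then M - 1 else M) + 1
      else (if T.getD j0 0 = number.getD j0 0 then M - 1 else M)) =
     (((List.range number.length).countP
        (fun j => (if j = j0 then v else f j) == number.getD j 0) : Nat) : Int)) := by
  have hlt : j0 < T.length := by omega
  have hgd : ∀ j < number.length, (T.set j0 v).getD j 0 = if j = j0 then v else f j := by
    intro j hj
    rw [pv_getD_set T j0 v hlt j]
    by_cases hjj : j = j0
    · rw [if_pos hjj, if_pos hjj]
    · rw [if_neg hjj, if_neg hjj, hT j hj]
  refine ⟨by simpa using hTlen, hgd, ?_⟩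
  have hupd := pv_countP_range_update number.length j0 hj0
    (fun j => f j == number.getD j 0) (fun j => (if j = j0 then v else f j) == number.getD j 0)
    (fun i hi => by simp only [if_neg hi])
  rw [hupd, ← hM, hgd j0 hj0, if_pos rfl, hT j0 hj0]
  simp only [beq_iff_eq]
  split_ifs <;> omega

-- the loop-body step function of B (definitionally the fold body of the port)
def pvBStep (index : PySem.Dict String Int) (number : List Int) (discount : List String)
    (st : List Int × Int × Int) (p : Int × String) : List Int × Int × Int :=
  let s1 : List Int × Int :=
    match index.get? p.2 with
    | some j =>
      (PySem.List.pySetD st.1 j (PySem.List.pyGetD st.1 j 0 + 1),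
       if PySem.List.pyGetD (PySem.List.pySetD st.1 j (PySem.List.pyGetD st.1 j 0 + 1)) j 0
          = PySem.List.pyGetD number j 0
       then (if PySem.List.pyGetD st.1 j 0 = PySem.List.pyGetD number j 0
             then st.2.1 - 1 else st.2.1) + 1
       else (if PySem.List.pyGetD st.1 j 0 = PySem.List.pyGetD number j 0
             then st.2.1 - 1 else st.2.1))
    | none => (st.1, st.2.1)
  let s2 : List Int × Int :=
    if 10 ≤ p.1 then
      match index.get? (PySem.List.pyGetD discount (p.1 - 10) "") with
      | some j =>
        (PySem.List.pySetD s1.1 j (PySem.List.pyGetD s1.1 j 0 - 1),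
         if PySem.List.pyGetD (PySem.List.pySetD s1.1 j (PySem.List.pyGetD s1.1 j 0 - 1)) j 0
            = PySem.List.pyGetD number j 0
         then (if PySem.List.pyGetD s1.1 j 0 = PySem.List.pyGetD number j 0
               then s1.2 - 1 else s1.2) + 1
         else (if PySem.List.pyGetD s1.1 j 0 = PySem.List.pyGetD number j 0
               then s1.2 - 1 else s1.2))
      | none => s1
    else s1
  (s2.1, s2.2, if 9 ≤ p.1 ∧ s2.2 = (number.length : Int) then st.2.2 + 1 else st.2.2)

theorem pv_bcond_iff (number : List Int) (F : Nat → Int) (k : Nat) :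
    (9 ≤ (k : Int) ∧ (((List.range number.length).countP
        (fun j => F j == number.getD j 0) : Nat) : Int) = (number.length : Int)) ↔
      (9 ≤ k ∧ ∀ j < number.length, F j = number.getD j 0) := by
  constructor
  · rintro ⟨h1, h2⟩
    refine ⟨by exact_mod_cast h1, ?_⟩
    intro j hj
    have hlen : (List.range number.length).countP (fun j => F j == number.getD j 0)
        = (List.range number.length).length := by
      rw [List.length_range]
      exact_mod_cast h2
    have := List.countP_eq_length.mp hlen j (List.mem_range.mpr hj)
    simpa using this
  · rintro ⟨h1, h2⟩
    refine ⟨by exact_mod_cast h1, ?_⟩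
    have : (List.range number.length).countP (fun j => F j == number.getD j 0)
        = (List.range number.length).length := by
      apply List.countP_eq_length.mpr
      intro j hj
      rw [List.mem_range] at hj
      simpa using h2 j hj
    rw [this, List.length_range]


-- entering item: one +1 update of the tally/matched pair
theorem pv_phase_add (want : List String) (number : List Int)
    (x : String) (hx : x ∈ want → want.idxOf x < number.length)
    (a : List String) (T : List Int) (M : Int)
    (hTlen : T.length = number.length)
    (hT : ∀ j < number.length, T.getD j 0 = pvAttr want a j)
    (hM : M = (((List.range number.length).countP
      (fun j => pvAttr want a j == number.getD j 0) : Nat) : Int)) :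
    ∃ T1, (match (pvIdxD want).get? x with
      | some j =>
        (PySem.List.pySetD T j (PySem.List.pyGetD T j 0 + 1),
         if PySem.List.pyGetD (PySem.List.pySetD T j (PySem.List.pyGetD T j 0 + 1)) j 0
            = PySem.List.pyGetD number j 0
         then (if PySem.List.pyGetD T j 0 = PySem.List.pyGetD number j 0 then M - 1 else M) + 1
         else (if PySem.List.pyGetD T j 0 = PySem.List.pyGetD number j 0 then M - 1 else M))
      | none => (T, M)) =
      (T1, (((List.range number.length).countP
        (fun j => pvAttr want (a ++ [x]) j == number.getD j 0) : Nat) : Int)) ∧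
    T1.length = number.length ∧
    ∀ j < number.length, T1.getD j 0 = pvAttr want (a ++ [x]) j := by
  by_cases hxw : x ∈ want
  · have hj0 : want.idxOf x < number.length := hx hxw
    rw [pv_idx_get_mem want x hxw]
    simp only [PySem.List.pySetD_natCast, PySem.List.pyGetD_natCast]
    rw [hT (want.idxOf x) hj0]
    obtain ⟨hlen1, hgd1, hM1⟩ := pv_upd number T (fun j => pvAttr want a j) hTlen hT
      (want.idxOf x) hj0 (pvAttr want a (want.idxOf x) + 1) M hM
    rw [hT (want.idxOf x) hj0] at hM1
    have hnew : ∀ j < number.length,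
        (if j = want.idxOf x then pvAttr want a (want.idxOf x) + 1 else pvAttr want a j)
          = pvAttr want (a ++ [x]) j := by
      intro j hj
      rw [pvAttr_append want a x j]
      by_cases hjj : j = want.idxOf x
      · rw [if_pos hjj, if_pos ⟨hxw, hjj.symm⟩, hjj]
      · rw [if_neg hjj, if_neg (fun hc => hjj hc.2.symm)]
        ring
    refine ⟨T.set (want.idxOf x) (pvAttr want a (want.idxOf x) + 1), ?_, hlen1, ?_⟩
    · rw [hM1]
      congr 2
      apply pv_countP_range_congr
      intro j hj
      rw [hnew j hj]
    · intro j hj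
      rw [hgd1 j hj, hnew j hj]
  · rw [pv_idx_get_notmem want x hxw]
    dsimp only
    refine ⟨T, ?_, hTlen, ?_⟩
    · rw [hM]
      congr 2
      apply pv_countP_range_congr
      intro j hj
      rw [pvAttr_append want a x j, if_neg (fun hc => hxw hc.1), add_zero]
    · intro j hj
      rw [hT j hj, pvAttr_append want a x j, if_neg (fun hc => hxw hc.1), add_zero]

-- leaving item: one -1 update of the tally/matched pair
theorem pv_phase_sub (want : List String) (number : List Int)
    (x : String) (hx : x ∈ want → want.idxOf x < number.length)
    (b : List String) (T : List Int) (M : Int)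
    (hTlen : T.length = number.length)
    (hT : ∀ j < number.length, T.getD j 0 = pvAttr want (x :: b) j)
    (hM : M = (((List.range number.length).countP
      (fun j => pvAttr want (x :: b) j == number.getD j 0) : Nat) : Int)) :
    ∃ T1, (match (pvIdxD want).get? x with
      | some j =>
        (PySem.List.pySetD T j (PySem.List.pyGetD T j 0 - 1),
         if PySem.List.pyGetD (PySem.List.pySetD T j (PySem.List.pyGetD T j 0 - 1)) j 0
            = PySem.List.pyGetD number j 0
         then (if PySem.List.pyGetD T j 0 = PySem.List.pyGetD number j 0 then M - 1 else M) + 1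
         else (if PySem.List.pyGetD T j 0 = PySem.List.pyGetD number j 0 then M - 1 else M))
      | none => (T, M)) =
      (T1, (((List.range number.length).countP
        (fun j => pvAttr want b j == number.getD j 0) : Nat) : Int)) ∧
    T1.length = number.length ∧
    ∀ j < number.length, T1.getD j 0 = pvAttr want b j := by
  by_cases hxw : x ∈ want
  · have hj0 : want.idxOf x < number.length := hx hxw
    rw [pv_idx_get_mem want x hxw]
    simp only [PySem.List.pySetD_natCast, PySem.List.pyGetD_natCast]
    rw [hT (want.idxOf x) hj0]
    obtain ⟨hlen1, hgd1, hM1⟩ := pv_upd number T (fun j => pvAttr want (x :: b) j) hTlen hT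
      (want.idxOf x) hj0 (pvAttr want (x :: b) (want.idxOf x) - 1) M hM
    rw [hT (want.idxOf x) hj0] at hM1
    have hnew : ∀ j < number.length,
        (if j = want.idxOf x then pvAttr want (x :: b) (want.idxOf x) - 1 else pvAttr want (x :: b) j)
          = pvAttr want b j := by
      intro j hj
      by_cases hjj : j = want.idxOf x
      · rw [if_pos hjj, hjj, pvAttr_cons want x b (want.idxOf x), if_pos ⟨hxw, rfl⟩]
        ring
      · rw [if_neg hjj, pvAttr_cons want x b j, if_neg (fun hc => hjj hc.2.symm)]
        ring
    refine ⟨T.set (want.idxOf x) (pvAttr want (x :: b) (want.idxOf x) - 1), ?_, hlen1, ?_⟩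
    · rw [hM1]
      congr 2
      apply pv_countP_range_congr
      intro j hj
      rw [hnew j hj]
    · intro j hj
      rw [hgd1 j hj, hnew j hj]
  · rw [pv_idx_get_notmem want x hxw]
    dsimp only
    refine ⟨T, ?_, hTlen, ?_⟩
    · rw [hM]
      congr 2
      apply pv_countP_range_congr
      intro j hj
      rw [pvAttr_cons want x b j, if_neg (fun hc => hxw hc.1), zero_add]
    · intro j hj
      rw [hT j hj, pvAttr_cons want x b j, if_neg (fun hc => hxw hc.1), zero_add]

-- one step of the sliding window: from the k-window state to the (k+1)-window state
theorem pv_bstep (want : List String) (number : List Int) (discount : List String)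
    (hdis : ∀ s ∈ discount, s ∈ want → want.idxOf s < number.length)
    (k : Nat) (hk : k < discount.length) (T : List Int) (M A : Int)
    (hTlen : T.length = number.length)
    (hT : ∀ j < number.length, T.getD j 0 = pvAttr want (pvSeg discount k) j)
    (hM : M = (((List.range number.length).countP
      (fun j => pvAttr want (pvSeg discount k) j == number.getD j 0) : Nat) : Int)) :
    ∃ T', pvBStep (pvIdxD want) number discount (T, M, A) ((k : Int), discount[k]) =
      (T', (((List.range number.length).countP
          (fun j => pvAttr want (pvSeg discount (k + 1)) j == number.getD j 0) : Nat) : Int),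
        A + (if 9 ≤ k ∧ (∀ j < number.length,
              pvAttr want (pvSeg discount (k + 1)) j = number.getD j 0) then 1 else 0)) ∧
      T'.length = number.length ∧
      ∀ j < number.length, T'.getD j 0 = pvAttr want (pvSeg discount (k + 1)) j := by
  have hdm : discount[k] ∈ want → want.idxOf discount[k] < number.length :=
    hdis discount[k] (List.getElem_mem hk)
  obtain ⟨T1, hP1, hlen1, hinv1⟩ := pv_phase_add want number discount[k] hdm
    (pvSeg discount k) T M hTlen hT hM
  simp only [pvBStep]
  rw [hP1]
  by_cases h10 : (10 : Int) ≤ (k : Int)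
  · have hknat : 10 ≤ k := by exact_mod_cast h10
    rw [if_pos h10]
    have ho : PySem.List.pyGetD discount ((k : Int) - 10) "" = discount[k - 10]'(by omega) := by
      have hc : ((k : Int) - 10) = (((k - 10 : Nat) : Nat) : Int) := by omega
      rw [hc, PySem.List.pyGetD_natCast, List.getD_eq_getElem _ _ (by omega)]
    rw [ho]
    have hcons : pvSeg discount k ++ [discount[k]] =
        discount[k - 10]'(by omega) :: pvSeg discount (k + 1) :=
      pv_seg_succ_large discount k hk hknat
    rw [hcons] at hP1 hinv1 ⊢
    have hodm : discount[k - 10]'(by omega) ∈ want →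
        want.idxOf (discount[k - 10]'(by omega)) < number.length :=
      hdis _ (List.getElem_mem (by omega))
    obtain ⟨T2, hP2, hlen2, hinv2⟩ := pv_phase_sub want number (discount[k - 10]'(by omega))
      hodm (pvSeg discount (k + 1)) T1 _ hlen1 hinv1 rfl
    rw [hP2]
    refine ⟨T2, ?_, hlen2, hinv2⟩
    simp only [Prod.mk.injEq, true_and]
    by_cases hcnd : 9 ≤ k ∧ ∀ j < number.length,
        pvAttr want (pvSeg discount (k + 1)) j = number.getD j 0
    · rw [if_pos ((pv_bcond_iff number
        (fun j => pvAttr want (pvSeg discount (k + 1)) j) k).mpr hcnd), if_pos hcnd]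
    · rw [if_neg (fun hc => hcnd ((pv_bcond_iff number
        (fun j => pvAttr want (pvSeg discount (k + 1)) j) k).mp hc)), if_neg hcnd]
      ring
  · rw [if_neg h10]
    have hsmall : pvSeg discount k ++ [discount[k]] = pvSeg discount (k + 1) :=
      pv_seg_succ_small discount k hk (by omega)
    rw [hsmall] at hP1 hinv1 ⊢
    refine ⟨T1, ?_, hlen1, hinv1⟩
    simp only [Prod.mk.injEq, true_and]
    by_cases hcnd : 9 ≤ k ∧ ∀ j < number.length,
        pvAttr want (pvSeg discount (k + 1)) j = number.getD j 0
    · rw [if_pos ((pv_bcond_iff number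
        (fun j => pvAttr want (pvSeg discount (k + 1)) j) k).mpr hcnd), if_pos hcnd]
    · rw [if_neg (fun hc => hcnd ((pv_bcond_iff number
        (fun j => pvAttr want (pvSeg discount (k + 1)) j) k).mp hc)), if_neg hcnd]
      ring

-- the whole loop: after k steps the answer counts the good windows among the first k days
theorem pv_bloop (want : List String) (number : List Int) (discount : List String)
    (hdis : ∀ s ∈ discount, s ∈ want → want.idxOf s < number.length)
    (T0 : List Int) (M0 : Int)
    (hT0len : T0.length = number.length)
    (hT0 : ∀ j < number.length, T0.getD j 0 = pvAttr want (pvSeg discount 0) j)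
    (hM0 : M0 = (((List.range number.length).countP
      (fun j => pvAttr want (pvSeg discount 0) j == number.getD j 0) : Nat) : Int))
    (k : Nat) (hk : k ≤ discount.length) :
    ∃ T, (PySem.List.enumerate (discount.take k) 0).foldl
        (pvBStep (pvIdxD want) number discount) (T0, M0, (0 : Int)) =
      (T, (((List.range number.length).countP
          (fun j => pvAttr want (pvSeg discount k) j == number.getD j 0) : Nat) : Int),
        (((List.range k).countP (fun i => decide (9 ≤ i) &&
          decide (∀ j < number.length,
            pvAttr want (pvSeg discount (i + 1)) j = number.getD j 0)) : Nat) : Int)) ∧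
      T.length = number.length ∧
      ∀ j < number.length, T.getD j 0 = pvAttr want (pvSeg discount k) j := by
  induction k with
  | zero =>
    refine ⟨T0, ?_, hT0len, hT0⟩
    rw [List.take_zero, PySem.List.enumerate_nil, List.foldl_nil]
    simp [hM0]
  | succ k ih =>
    obtain ⟨T, hfold, hTlen, hT⟩ := ih (by omega)
    have hklt : k < discount.length := by omega
    rw [List.take_add_one, List.getElem?_eq_getElem hklt]
    have htklen : (discount.take k).length = k := by rw [List.length_take]; omega
    rw [Option.toList_some, PySem.List.enumerate_append, List.foldl_append, hfold, htklen,
      PySem.List.enumerate_cons, PySem.List.enumerate_nil, List.foldl_cons, List.foldl_nil]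
    obtain ⟨T', hstep, hT'len, hT'⟩ :=
      pv_bstep want number discount hdis k hklt T _ _ hTlen hT rfl
    have hz : (0 : Int) + (k : Int) = (k : Int) := by omega
    rw [hz, hstep]
    refine ⟨T', ?_, hT'len, hT'⟩
    congr 1
    congr 1
    rw [List.range_succ, List.countP_append]
    push_cast
    rw [List.countP_cons]
    simp only [List.countP_nil, Bool.and_eq_true, decide_eq_true_eq]
    by_cases hcnd : 9 ≤ k ∧ ∀ j < number.length,
        pvAttr want (pvSeg discount (k + 1)) j = number.getD j 0
    · rw [if_pos hcnd, if_pos (by simpa using hcnd)]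
      push_cast; ring
    · rw [if_neg hcnd, if_neg (by simpa using hcnd)]
      push_cast; ring

theorem pv_matched0 (number : List Int) (want discount : List String) :
    (number.foldl (fun m n => if n = 0 then m + 1 else m) (0 : Int)) =
    (((List.range number.length).countP
      (fun j => pvAttr want (pvSeg discount 0) j == number.getD j 0) : Nat) : Int) := by
  have hseg : pvSeg discount 0 = [] := by unfold pvSeg; simp
  have hnum : number = (List.range number.length).map (fun j => number.getD j 0) := by
    apply List.ext_getElem
    · simp
    · intro j h1 h2
      simp only [List.getElem_map, List.getElem_range, List.getD_eq_getElem?_getD,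
        List.getElem?_eq_getElem h1, Option.getD_some]
  have hfold : (number.foldl (fun m n => if n = 0 then m + 1 else m) (0 : Int)) =
      ((number.countP (fun n => decide (n = 0)) : Nat) : Int) := by
    rw [PySem.List.foldl_congr_mem _ _
      (fun (m : Int) (n : Int) => if (fun n => decide (n = 0)) n = true then m + 1 else m) 0
      (fun m n _ => by simp), PySem.List.foldl_count_if, zero_add]
  rw [hfold]
  congr 1
  conv_lhs => rw [hnum]
  rw [List.countP_map]
  apply List.countP_congr
  intro j _
  simp only [Function.comp_apply, hseg, pvAttr_nil, beq_iff_eq, decide_eq_true_eq]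
  exact eq_comm

theorem pv_ans_eq (want : List String) (number : List Int) (discount : List String) :
    (((List.range discount.length).countP (fun i => decide (9 ≤ i) &&
        decide (∀ j < number.length,
          pvAttr want (pvSeg discount (i + 1)) j = number.getD j 0)) : Nat) : Int) =
      pvRef want number discount := by
  unfold pvRef
  congr 1
  by_cases h9 : 9 ≤ discount.length
  · obtain ⟨m, hm⟩ : ∃ m, discount.length = 9 + m := ⟨discount.length - 9, by omega⟩
    rw [hm, show 9 + m - 9 = m by omega, List.range_add, List.countP_append]
    have hz : (List.range 9).countP (fun i => decide (9 ≤ i) &&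
        decide (∀ j < number.length,
          pvAttr want (pvSeg discount (i + 1)) j = number.getD j 0)) = 0 := by
      apply List.countP_eq_zero.mpr
      intro i hi
      rw [List.mem_range] at hi
      simp [show ¬ (9 ≤ i) by omega]
    rw [hz, Nat.zero_add, List.countP_map]
    apply List.countP_congr
    intro i _
    simp only [Function.comp_apply, Bool.and_eq_true, decide_eq_true_eq]
    have hseg : pvSeg discount (9 + i + 1) = (discount.drop i).take 10 := by
      rw [pv_seg_window discount (9 + i) (by omega), show 9 + i - 9 = i from by omega]
    rw [hseg]
    constructor
    · rintro ⟨_, h⟩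
      exact h
    · intro h
      exact ⟨by omega, h⟩
  · rw [show discount.length - 9 = 0 by omega, List.range_zero, List.countP_nil]
    apply List.countP_eq_zero.mpr
    intro i hi
    rw [List.mem_range] at hi
    simp [show ¬ (9 ≤ i) by omega]

theorem pv_alt_closed (want : List String) (number : List Int) (discount : List String) :
    solution_alt want number discount =
      (let tally0 : List Int := (PySem.List.pyRange 0 (number.length : Int) 1).map (fun _ => 0)
      let matched0 : Int := number.foldl (fun m n => if n = 0 then m + 1 else m) 0
      ((PySem.List.enumerate discount 0).foldl (pvBStep (pvIdxD want) number discount)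
        (tally0, matched0, (0 : Int))).2.2) := rfl

theorem pvB_eq_ref (want : List String) (number : List Int) (discount : List String)
    (hdis : ∀ s ∈ discount, s ∈ want → want.idxOf s < number.length) :
    solution_alt want number discount = pvRef want number discount := by
  rw [pv_alt_closed]
  simp only
  have hseg0 : pvSeg discount 0 = [] := by unfold pvSeg; simp
  have hT0len : ((PySem.List.pyRange 0 (number.length : Int) 1).map
      (fun _ => (0 : Int))).length = number.length := by
    rw [List.length_map, PySem.List.length_pyRange_one]
    omega
  have hT0 : ∀ j < number.length, ((PySem.List.pyRange 0 (number.length : Int) 1).map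
      (fun _ => (0 : Int))).getD j 0 = pvAttr want (pvSeg discount 0) j := by
    intro j hj
    rw [hseg0, pvAttr_nil, List.getD_eq_getElem _ _ (by omega), List.getElem_map]
  obtain ⟨T, hfold, -, -⟩ := pv_bloop want number discount hdis _ _ hT0len hT0
    (pv_matched0 number want discount) discount.length (le_refl _)
  rw [List.take_length] at hfold
  rw [hfold]
  simp only
  exact pv_ans_eq want number discount

-- ===== VERDICT (by name: the statement is the Claim_ definition above) =====
theorem solution_spec : Claim_equal_solution := by
  intro want number discount _ hpre
  unfold Spec_solution
  rw [pvA_eq_ref want number discount hpre, pvB_eq_ref want number discount hpre]
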